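-- pv_equiv track=rewrite | github.com/CyberMind-FR/secubox-deb | packages/secubox-device-intel/api/main.py | _is_router_vendor
-- ===== SOURCE A (Python) =====
-- ROUTER_VENDORS = {
--     "TP-LINK": ["EC:08:6B", "50:C7:BF", "14:CC:20", "AC:84:C6", "C0:25:E9", "E4:F4:C6"],
--     "Ubiquiti": ["DC:9F:DB", "24:A4:3C", "80:2A:A8", "F0:9F:C2", "78:8A:20", "68:72:51"],
--     "GL.iNet": ["E4:95:6E", "94:83:C4"],
--     "Netgear": ["A0:63:91", "20:0C:C8", "C0:FF:D4", "9C:D3:6D", "10:0D:7F"],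
--     "Asus": ["04:D9:F5", "AC:9E:17", "50:46:5D", "38:D5:47", "1C:87:2C"],
--     "Linksys": ["20:AA:4B", "C0:56:27", "58:6D:8F", "A4:2B:8C"],
--     "D-Link": ["1C:7E:E5", "28:10:7B", "90:94:E4", "C4:A8:1D", "78:54:2E"],
--     "MikroTik": ["D4:01:C3", "4C:5E:0C", "6C:3B:6B", "C4:AD:34", "E4:8D:8C"],
--     "OpenWrt": ["02:00:00"],  # OpenWrt default MAC prefix
--     "Xiaomi": ["64:09:80", "78:11:DC", "28:6C:07", "50:64:2B"],
--     "Huawei": ["48:46:FB", "20:F3:A3", "E0:24:7F", "88:CE:FA"],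
-- }
--
-- def _is_router_vendor(mac: str) -> tuple[bool, str]:
--     """Check if MAC belongs to a known router vendor."""
--     mac_upper = mac.upper().replace("-", ":")
--     prefix = mac_upper[:8]
--
--     for vendor, prefixes in ROUTER_VENDORS.items():
--         for p in prefixes:
--             if prefix.startswith(p.upper()):
--                 return True, vendor
--     return False, ""
-- ===== SOURCE B (Python) =====
-- ROUTER_VENDORS = {
--     "TP-LINK": ["EC:08:6B", "50:C7:BF", "14:CC:20", "AC:84:C6", "C0:25:E9", "E4:F4:C6"],
--     "Ubiquiti": ["DC:9F:DB", "24:A4:3C", "80:2A:A8", "F0:9F:C2", "78:8A:20", "68:72:51"],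
--     "GL.iNet": ["E4:95:6E", "94:83:C4"],
--     "Netgear": ["A0:63:91", "20:0C:C8", "C0:FF:D4", "9C:D3:6D", "10:0D:7F"],
--     "Asus": ["04:D9:F5", "AC:9E:17", "50:46:5D", "38:D5:47", "1C:87:2C"],
--     "Linksys": ["20:AA:4B", "C0:56:27", "58:6D:8F", "A4:2B:8C"],
--     "D-Link": ["1C:7E:E5", "28:10:7B", "90:94:E4", "C4:A8:1D", "78:54:2E"],
--     "MikroTik": ["D4:01:C3", "4C:5E:0C", "6C:3B:6B", "C4:AD:34", "E4:8D:8C"],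
--     "OpenWrt": ["02:00:00"],
--     "Xiaomi": ["64:09:80", "78:11:DC", "28:6C:07", "50:64:2B"],
--     "Huawei": ["48:46:FB", "20:F3:A3", "E0:24:7F", "88:CE:FA"],
-- }
--
-- # Built once: flat prefix -> vendor index; setdefault keeps the first-listed vendor.
-- PREFIX_TO_VENDOR = {}
-- for _vendor, _prefixes in ROUTER_VENDORS.items():
--     for _p in _prefixes:
--         PREFIX_TO_VENDOR.setdefault(_p, _vendor)
--
--
-- def _is_router_vendor(mac: str) -> tuple[bool, str]:
--     """Check if MAC belongs to a known router vendor."""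
--     prefix = mac.upper().replace("-", ":")[:8]
--     vendor = PREFIX_TO_VENDOR.get(prefix)
--     return (True, vendor) if vendor is not None else (False, "")
-- ===== Notes on version B (the rewrite author's own statement) =====
-- stated objective: simpler
-- what changed: Replaces the nested vendor-by-prefix startswith scan with a single lookup in a flat prefix-to-vendor dict built once at module load (equality lookup is exact because all stored prefixes are exactly 8 characters, the length of the normalized MAC prefix; setdefault keeps the first-listed vendor).
import Mathlib
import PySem

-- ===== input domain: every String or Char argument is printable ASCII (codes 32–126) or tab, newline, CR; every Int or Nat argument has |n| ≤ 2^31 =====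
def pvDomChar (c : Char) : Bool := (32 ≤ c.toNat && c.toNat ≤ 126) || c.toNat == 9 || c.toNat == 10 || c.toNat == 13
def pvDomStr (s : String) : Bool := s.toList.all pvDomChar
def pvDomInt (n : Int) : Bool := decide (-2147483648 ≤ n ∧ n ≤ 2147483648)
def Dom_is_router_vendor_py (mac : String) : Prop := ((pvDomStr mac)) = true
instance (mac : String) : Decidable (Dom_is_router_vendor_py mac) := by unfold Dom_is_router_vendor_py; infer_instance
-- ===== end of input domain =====

-- B replaces A's nested vendor×prefix startswith scan by one lookup in a flat
-- prefix→vendor dict built once from the same table (objective: simpler call path).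

-- ===== PORT A =====
def routerVendors : List (String × List String) := [
  ("TP-LINK", ["EC:08:6B", "50:C7:BF", "14:CC:20", "AC:84:C6", "C0:25:E9", "E4:F4:C6"]),
  ("Ubiquiti", ["DC:9F:DB", "24:A4:3C", "80:2A:A8", "F0:9F:C2", "78:8A:20", "68:72:51"]),
  ("GL.iNet", ["E4:95:6E", "94:83:C4"]),
  ("Netgear", ["A0:63:91", "20:0C:C8", "C0:FF:D4", "9C:D3:6D", "10:0D:7F"]),
  ("Asus", ["04:D9:F5", "AC:9E:17", "50:46:5D", "38:D5:47", "1C:87:2C"]),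
  ("Linksys", ["20:AA:4B", "C0:56:27", "58:6D:8F", "A4:2B:8C"]),
  ("D-Link", ["1C:7E:E5", "28:10:7B", "90:94:E4", "C4:A8:1D", "78:54:2E"]),
  ("MikroTik", ["D4:01:C3", "4C:5E:0C", "6C:3B:6B", "C4:AD:34", "E4:8D:8C"]),
  ("OpenWrt", ["02:00:00"]),
  ("Xiaomi", ["64:09:80", "78:11:DC", "28:6C:07", "50:64:2B"]),
  ("Huawei", ["48:46:FB", "20:F3:A3", "E0:24:7F", "88:CE:FA"])]

-- inner 'for p in prefixes' loop of A
def prefixScan (pre vendor : String) : List String → Option (Bool × String)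
  | [] => none
  | p :: ps =>
      if PySem.Str.startswith pre (PySem.Str.upper p) then some (true, vendor)
      else prefixScan pre vendor ps

-- outer 'for vendor, prefixes in ROUTER_VENDORS.items()' loop of A
def vendorScan (pre : String) : List (String × List String) → Bool × String
  | [] => (false, "")
  | vp :: rest =>
      match prefixScan pre vp.1 vp.2 with
      | some r => r
      | none => vendorScan pre rest

def is_router_vendor_py (mac : String) : Bool × String :=
  let macUpper := PySem.Str.replace (PySem.Str.upper mac) "-" ":"
  let pre := PySem.Str.slice macUpper none (some 8)
  vendorScan pre routerVendors

-- ===== PORT B =====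
-- PREFIX_TO_VENDOR, built once from ROUTER_VENDORS with setdefault
def prefixToVendor : PySem.Dict String String :=
  routerVendors.foldl
    (fun d vp => vp.2.foldl (fun d p => d.setdefault p vp.1) d)
    PySem.Dict.empty

-- '(True, vendor) if vendor is not None else (False, "")'
def lookupHit (v? : Option String) : Bool × String :=
  match v? with
  | some v => (true, v)
  | none => (false, "")

def is_router_vendor_py_alt (mac : String) : Bool × String :=
  let pre := PySem.Str.slice (PySem.Str.replace (PySem.Str.upper mac) "-" ":") none (some 8)
  lookupHit (prefixToVendor.get? pre)

-- ===== PRECONDITION & SPEC =====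
def Spec_is_router_vendor_py (mac : String) (out : Bool × String) : Prop := out = is_router_vendor_py_alt mac
instance (mac : String) (out : Bool × String) : Decidable (Spec_is_router_vendor_py mac out) := by unfold Spec_is_router_vendor_py; infer_instance

-- ===== CLAIM (what is proved, stated in full; the proofs are below) =====
def Claim_equal_is_router_vendor_py : Prop := ∀ (mac : String), Dom_is_router_vendor_py mac → Spec_is_router_vendor_py mac (is_router_vendor_py mac)

-- ===== LEMMAS AND PROOFS =====

-- flattening of the table into (prefix, vendor) pairs, A's scan order
def flatPairs (tbl : List (String × List String)) : List (String × String) :=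
  tbl.flatMap (fun vp => vp.2.map (fun p => (p, vp.1)))

-- startswith on a ≤8-char string with an 8-char pattern is equality
theorem startswith_eq_beq (pre P : String) (h8 : pre.toList.length ≤ 8)
    (hP : P.toList.length = 8) : PySem.Str.startswith pre P = (P == pre) := by
  by_cases h : P = pre
  · subst h
    simp [PySem.Str.startswith_eq]
    exact (PySem.Chars.startswith_iff _ _).mpr (List.prefix_refl _)
  · have hne : (P == pre) = false := by simp [h]
    rw [hne]
    by_contra hsw
    have hsw' : PySem.Str.startswith pre P = true := by
      cases hx : PySem.Str.startswith pre P
      · exact absurd hx hsw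
      · rfl
    rw [PySem.Str.startswith_eq] at hsw'
    have hpref : P.toList <+: pre.toList := (PySem.Chars.startswith_iff _ _).mp hsw'
    have heq : P.toList = pre.toList := hpref.eq_of_length_le (by omega)
    exact h (by
      have := congrArg String.ofList heq
      simpa using this)

theorem prefixScan_eq_find (pre vendor : String) (ps : List String)
    (h8 : pre.toList.length ≤ 8)
    (hall : ∀ p ∈ ps, (PySem.Str.upper p).toList.length = 8 ∧ PySem.Str.upper p = p) :
    prefixScan pre vendor ps = (ps.find? (fun p => p == pre)).map (fun _ => (true, vendor)) := by
  induction ps with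
  | nil => rfl
  | cons p ps ih =>
      have hp := hall p (List.mem_cons_self ..)
      rw [prefixScan, startswith_eq_beq pre _ h8 hp.1, hp.2]
      by_cases h : (p == pre) = true
      · simp [List.find?, h]
      · have h' : (p == pre) = false := by simpa using h
        simp [h', List.find?, ih (fun q hq => hall q (List.mem_cons_of_mem _ hq))]

theorem vendorScan_eq_find (pre : String) (tbl : List (String × List String))
    (h8 : pre.toList.length ≤ 8)
    (hall : ∀ q ∈ flatPairs tbl, (PySem.Str.upper q.1).toList.length = 8 ∧ PySem.Str.upper q.1 = q.1) :
    vendorScan pre tbl =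
      match (flatPairs tbl).find? (fun q => q.1 == pre) with
      | some q => (true, q.2)
      | none => (false, "") := by
  induction tbl with
  | nil => rfl
  | cons vp rest ih =>
      have hflat : flatPairs (vp :: rest) = vp.2.map (fun p => (p, vp.1)) ++ flatPairs rest := by
        simp [flatPairs]
      have hhead : ∀ p ∈ vp.2, (PySem.Str.upper p).toList.length = 8 ∧ PySem.Str.upper p = p := by
        intro p hp
        exact hall (p, vp.1) (by rw [hflat]; exact List.mem_append_left _ (List.mem_map_of_mem hp))
      have hrest : ∀ q ∈ flatPairs rest, (PySem.Str.upper q.1).toList.length = 8 ∧ PySem.Str.upper q.1 = q.1 := by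
        intro q hq
        exact hall q (by rw [hflat]; exact List.mem_append_right _ hq)
      rw [vendorScan, prefixScan_eq_find pre vp.1 vp.2 h8 hhead, ih hrest, hflat,
        List.find?_append, List.find?_map]
      cases hfa : vp.2.find? (fun p => p == pre) with
      | none =>
          simp only [Option.map_none]
          have : (vp.2.find? ((fun q => q.1 == pre) ∘ fun p => (p, vp.1))) = none := by
            simpa [Function.comp] using hfa
          rw [this]
          rfl
      | some p =>
          simp only [Option.map_some]
          have : (vp.2.find? ((fun q => q.1 == pre) ∘ fun p => (p, vp.1))) = some p := by
            simpa [Function.comp] using hfa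
          rw [this]
          rfl

theorem get?_setdefault_foldl (l : List (String × String)) (d : PySem.Dict String String)
    (k : String) :
    (l.foldl (fun d q => d.setdefault q.1 q.2) d).get? k =
      match d.get? k with
      | some v => some v
      | none => (l.find? (fun q => q.1 == k)).map (·.2) := by
  induction l generalizing d with
  | nil => simp only [List.foldl_nil]; cases h : d.get? k <;> simp
  | cons q l ih =>
      rw [List.foldl_cons, ih]
      by_cases hqk : q.1 = k
      · subst hqk
        rw [PySem.Dict.get?_setdefault_self]
        cases h : d.get? q.1 with
        | some v => simp
        | none => simp [List.find?]
      · rw [PySem.Dict.get?_setdefault_of_ne _ _ (fun h => hqk h.symm)]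
        cases h : d.get? k with
        | some v => simp
        | none =>
            have : (q.1 == k) = false := by simpa using hqk
            simp [List.find?, this]

theorem prefixToVendor_get? (k : String) :
    prefixToVendor.get? k =
      ((flatPairs routerVendors).find? (fun q => q.1 == k)).map (·.2) := by
  have hfold : ∀ (tbl : List (String × List String)) (d : PySem.Dict String String),
      tbl.foldl (fun d vp => vp.2.foldl (fun d p => d.setdefault p vp.1) d) d
        = (flatPairs tbl).foldl (fun d q => d.setdefault q.1 q.2) d := by
    intro tbl
    induction tbl with
    | nil => intro d; rfl
    | cons vp rest ih =>
        intro d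
        have hflat : flatPairs (vp :: rest) = vp.2.map (fun p => (p, vp.1)) ++ flatPairs rest := by
          simp [flatPairs]
        rw [List.foldl_cons, ih, hflat, List.foldl_append, List.foldl_map]
  rw [prefixToVendor, hfold, get?_setdefault_foldl]
  simp [PySem.Dict.get?_empty]

set_option maxRecDepth 100000 in
theorem main_eq (pre : String) (h8 : pre.toList.length ≤ 8) :
    vendorScan pre routerVendors = lookupHit (prefixToVendor.get? pre) := by
  rw [vendorScan_eq_find pre routerVendors h8 (by decide), prefixToVendor_get?]
  cases ((flatPairs routerVendors).find? (fun q => q.1 == pre)) <;> rfl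

-- ===== VERDICT (by name: the statement is the Claim_ definition above) =====
set_option maxRecDepth 200000 in
theorem is_router_vendor_py_spec : Claim_equal_is_router_vendor_py := by
  intro mac _
  unfold Spec_is_router_vendor_py
  show is_router_vendor_py mac = is_router_vendor_py_alt mac
  have h8 : (PySem.Str.slice (PySem.Str.replace (PySem.Str.upper mac) "-" ":") none (some 8)).toList.length ≤ 8 := by
    rw [PySem.Str.toList_slice]
    simp only [PySem.Chars.slice_eq_listSlice]
    rw [PySem.List.slice_to _ (by norm_num)]
    rw [List.length_take]
    omega
  have hA : is_router_vendor_py mac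
      = vendorScan (PySem.Str.slice (PySem.Str.replace (PySem.Str.upper mac) "-" ":") none (some 8)) routerVendors := rfl
  have hB : is_router_vendor_py_alt mac
      = lookupHit (prefixToVendor.get? (PySem.Str.slice (PySem.Str.replace (PySem.Str.upper mac) "-" ":") none (some 8))) := rfl
  rw [hA, hB]
  exact main_eq _ h8
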